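-- pv_equiv track=rewrite | github.com/Jattwood90/DataStructures-Algorithms | 4. Recursion/4. recursion_int_2.py | permut
-- ===== SOURCE A (Python) =====
-- def permut(s, out=None):
--     if out is None:
--         out = []
--
--     if s in out:
--         return out
--     else:
--         out.append(s)
--         return permut((s[-1] + s[:-1]), out)
-- ===== SOURCE B (Python) =====
-- def permut(s, out=None):
--     if out is None:
--         out = []
--     seen = set(out)
--     n = len(s)
--     for i in range(n):
--         r = s[n - i:] + s[:n - i]
--         if r in seen:
--             break
--         out.append(r)
--         seen.add(r)
--     return out
-- ===== Notes on version B (the rewrite author's own statement) =====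
-- stated objective: alternative
-- what changed: Replaces A's unbounded recursion (which builds each next rotation one character at a time and scans the output list for membership) by a bounded for-loop over range(len(s)) that computes the i-th rotation directly by slicing and tests membership in a set.
-- outside the precondition, e.g. on permut('', None): A raises IndexError, B returns []
import Mathlib
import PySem

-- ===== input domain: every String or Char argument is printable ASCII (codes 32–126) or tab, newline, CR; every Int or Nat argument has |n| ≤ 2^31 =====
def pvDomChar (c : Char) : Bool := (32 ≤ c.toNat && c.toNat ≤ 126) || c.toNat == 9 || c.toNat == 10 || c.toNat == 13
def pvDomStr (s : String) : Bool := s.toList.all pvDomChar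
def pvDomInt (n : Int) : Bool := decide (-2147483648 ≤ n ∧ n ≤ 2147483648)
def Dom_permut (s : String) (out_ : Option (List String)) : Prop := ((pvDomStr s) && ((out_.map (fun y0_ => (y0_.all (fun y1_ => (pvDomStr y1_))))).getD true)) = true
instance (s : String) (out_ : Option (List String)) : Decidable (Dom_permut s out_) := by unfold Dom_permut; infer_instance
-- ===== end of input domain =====

-- B replaces A's unbounded recursion (one-character rotation per call, list membership) by a
-- bounded indexed for-loop computing each rotation directly by slicing, with a set for membership;
-- equivalence is about the RETURN value (in Python both append the same elements to a passed list,
-- except where A raises).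

-- ===== PORT A =====
-- The Nat fuel only makes A's recursion total in Lean: under Pre_ the recursion stops after at
-- most s.length + 1 calls (the rotations of s repeat after s.length steps), so fuel 0 is unreachable.
def permutRec : Nat → String → List String → List String
  | 0, _, out => out                      -- fuel exhausted: never reached on inputs satisfying Pre_
  | fuel + 1, s, out =>
    if s ∈ out then out                   -- if s in out: return out
    else
      match PySem.Str.pyGet? s (-1) with  -- s[-1]; none = IndexError (excluded by Pre_)
      | none => out ++ [s]
      | some c =>                          -- permut(s[-1] + s[:-1], out) after out.append(s)
        permutRec fuel (String.ofList (c :: (PySem.Str.slice s none (some (-1))).toList)) (out ++ [s])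

def permut (s : String) (out_ : Option (List String)) : List String :=
  let out := match out_ with | none => [] | some l => l    -- if out is None: out = []
  permutRec (s.toList.length + 1) s out

-- ===== PORT B =====
-- for i in range(n): r = s[n-i:] + s[:n-i]; if r in seen: break; out.append(r); seen.add(r)
-- (the for-loop with break is recursion on the list of remaining indices)
def altLoop (s : List Char) (n : Nat) (idxs : List Nat) (out : List String) (seen : PySem.Set String) : List String :=
  match idxs with
  | [] => out
  | i :: rest =>
    let r := String.ofList (s.drop (n - i) ++ s.take (n - i))  -- slices with 0 ≤ n-i ≤ n: drop/take exact
    if seen.contains r then out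
    else altLoop s n rest (out ++ [r]) (seen.add r)

def permut_alt (s : String) (out_ : Option (List String)) : List String :=
  let out := match out_ with | none => [] | some l => l
  altLoop s.toList s.toList.length (List.range s.toList.length) out (PySem.Set.ofList out)

-- ===== PRECONDITION & SPEC =====
-- Pre_ excludes exactly the inputs where A raises IndexError: s == "" with "" not already in out
-- (A appends "" and then evaluates ""[-1]).
def Pre_permut (s : String) (out_ : Option (List String)) : Prop :=
  s = "" → "" ∈ (match out_ with | none => ([] : List String) | some l => l)
instance (s : String) (out_ : Option (List String)) : Decidable (Pre_permut s out_) := by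
  unfold Pre_permut; infer_instance

def pvWitness_permut : String × Option (List String) := ("ab", none)

def Spec_permut (s : String) (out_ : Option (List String)) (out : List String) : Prop := out = permut_alt s out_
instance (s : String) (out_ : Option (List String)) (out : List String) : Decidable (Spec_permut s out_ out) := by unfold Spec_permut; infer_instance

-- ===== CLAIM (what is proved, stated in full; the proofs are below) =====
def Claim_equal_permut : Prop := ∀ (s : String) (out_ : Option (List String)), Dom_permut s out_ → Pre_permut s out_ → Spec_permut s out_ (permut s out_)

-- ===== LEMMAS AND PROOFS =====

-- A's one-step rotation s[-1] + s[:-1] is a left-rotation by length - 1.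
lemma rotr_eq (m : List Char) (h : m ≠ []) :
    m.getLast h :: m.dropLast = m.rotate (m.length - 1) := by
  have hm : 0 < m.length := List.length_pos_iff.mpr h
  rw [List.rotate_eq_drop_append_take (by omega), List.drop_length_sub_one h,
    ← List.dropLast_eq_take]
  rfl

lemma pyGet_neg_one (m : List Char) (h : m ≠ []) :
    PySem.Str.pyGet? (String.ofList m) (-1) = some (m.getLast h) := by
  have hm : 0 < m.length := List.length_pos_iff.mpr h
  have h1 : (1 : Int) ≤ m.length := by exact_mod_cast hm
  simp [PySem.List.pyGet?, PySem.List.pyIdx?, h1]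
  rw [List.getElem?_eq_getElem (by omega)]
  simp [List.getLast_eq_getElem]

-- Unfolding equations for the two loops (definitional).
lemma permutRec_succ (fuel : Nat) (s : String) (out : List String) :
    permutRec (fuel + 1) s out =
      if s ∈ out then out
      else
        match PySem.Str.pyGet? s (-1) with
        | none => out ++ [s]
        | some c =>
          permutRec fuel (String.ofList (c :: (PySem.Str.slice s none (some (-1))).toList))
            (out ++ [s]) := rfl

lemma altLoop_cons (s : List Char) (n i : Nat) (rest : List Nat) (out : List String)
    (seen : PySem.Set String) :
    altLoop s n (i :: rest) out seen =
      if seen.contains (String.ofList (s.drop (n - i) ++ s.take (n - i))) then out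
      else altLoop s n rest (out ++ [String.ofList (s.drop (n - i) ++ s.take (n - i))])
        (seen.add (String.ofList (s.drop (n - i) ++ s.take (n - i)))) := rfl

-- Main loop correspondence: after k steps A's current string is the rotation l.rotate (l.length - k),
-- its remaining recursion depth is l.length + 1 - k, and B's loop has the indices k, …, l.length - 1 left.
lemma key (l : List Char) (hl : l ≠ []) :
    ∀ (j k : Nat), k ≤ l.length → l.length - k = j →
    ∀ (out : List String) (seen : PySem.Set String),
      (∀ x : String, x ∈ seen ↔ x ∈ out) →
      (0 < k → String.ofList l ∈ out) →
      permutRec (l.length + 1 - k) (String.ofList (l.rotate (l.length - k))) out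
        = altLoop l l.length (List.range' k (l.length - k)) out seen := by
  have hn : 0 < l.length := List.length_pos_iff.mpr hl
  intro j
  induction j with
  | zero =>
    intro k hk hj out seen hseen hmem
    have hkn : k = l.length := by omega
    subst hkn
    have hfuel : l.length + 1 - l.length = 1 := by omega
    rw [hfuel, Nat.sub_self, List.rotate_zero]
    simp [permutRec, altLoop, hmem hn]
  | succ j ih =>
    intro k hk hj out seen hseen hmem
    have hklt : k < l.length := by omega
    set n := l.length with hn_def
    set m := l.rotate (n - k) with hm_def
    have hml : m.length = n := by rw [hm_def, List.length_rotate]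
    have hmne : m ≠ [] := by
      intro hnil; rw [hnil] at hml; simp at hml; omega
    have hrot : String.ofList (l.drop (n - k) ++ l.take (n - k)) = String.ofList m := by
      rw [hm_def, List.rotate_eq_drop_append_take (by omega)]
    rw [show n + 1 - k = (n - k) + 1 from by omega, permutRec_succ,
      show List.range' k (n - k) = k :: List.range' (k + 1) j from by rw [hj, List.range'_succ],
      altLoop_cons, hrot]
    by_cases hmemr : String.ofList m ∈ out
    · rw [if_pos hmemr, if_pos ((PySem.Set.contains_iff _ _).mpr ((hseen _).mpr hmemr))]
    · have hc : ¬ seen.contains (String.ofList m) = true := by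
        intro hcon
        exact hmemr ((hseen _).mp ((PySem.Set.contains_iff _ _).mp hcon))
      rw [if_neg hmemr, if_neg hc, pyGet_neg_one m hmne]
      -- the string A recurses on is the next rotation
      have hnext : (m.getLast hmne :: (PySem.Str.slice (String.ofList m) none (some (-1))).toList)
          = l.rotate (n - (k + 1)) := by
        rw [PySem.Str.slice_to_neg_one, String.toList_ofList, rotr_eq m hmne, hml, hm_def,
          List.rotate_rotate]
        rw [show n - k + (n - 1) = n + (n - (k + 1)) from by omega, ← List.rotate_rotate,
          List.rotate_length]
      simp only []
      rw [hnext, show n - k = n + 1 - (k + 1) from by omega,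
        show j = n - (k + 1) from by omega]
      apply ih (k + 1) (by omega) (by omega)
      · intro x
        rw [PySem.Set.mem_add]
        simp [hseen x]
      · intro _
        rcases Nat.eq_zero_or_pos k with hk0 | hkpos
        · subst hk0
          have hml2 : m = l := by
            rw [hm_def, Nat.sub_zero, List.rotate_length]
          rw [← hml2]
          simp
        · exact List.mem_append_left _ (hmem hkpos)

-- ===== VERDICT (by name: the statement is the Claim_ definition above) =====
theorem permut_spec : Claim_equal_permut := by
  intro s out_ _hdom hpre
  unfold Spec_permut
  by_cases hnil : s.toList = []
  · have hs : s = "" := by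
      have h2 := congrArg String.ofList hnil
      rwa [String.ofList_toList] at h2
    subst hs
    have hmem := hpre rfl
    cases out_ <;> simp_all [permut, permut_alt, permutRec, altLoop]
  · have main : ∀ out0 : List String,
        permutRec (s.toList.length + 1) s out0
          = altLoop s.toList s.toList.length (List.range s.toList.length) out0
            (PySem.Set.ofList out0) := by
      intro out0
      have hkey := key s.toList hnil (s.toList.length) 0 (by omega) (by omega) out0
        (PySem.Set.ofList out0) (fun x => PySem.Set.mem_ofList _ x) (by omega)
      simp only [Nat.sub_zero] at hkey
      rw [List.rotate_length, String.ofList_toList, ← List.range_eq_range'] at hkey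
      exact hkey
    cases out_ with
    | none =>
        show permutRec (s.toList.length + 1) s []
            = altLoop s.toList s.toList.length (List.range s.toList.length) [] (PySem.Set.ofList [])
        exact main []
    | some l0 =>
        show permutRec (s.toList.length + 1) s l0
            = altLoop s.toList s.toList.length (List.range s.toList.length) l0 (PySem.Set.ofList l0)
        exact main l0
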